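-- pv_equiv track=rewrite | github.com/The1one1/Other_comp | google31.py | lab
-- ===== SOURCE A (Python) =====
-- def lab(n,p):
--     if (p < n-1):
--         return []
--     l=[]
--     t=0
--     x=1
--     for i in range(n-1,0,-1):
--         x=x+1
--
--         if t+x+i-1 >= p:
--             r=p-t-i+1
--             l.append(r)
--             for k in range(i-1):
--                 l.append(1)
--             t=p
--             break
--
--         t+=x
--         l.append(x)
--     if t<p:
--         return []
--     return l
-- ===== SOURCE B (Python) =====
-- def lab(n, p):
--     # closed-form/binary-search reconstruction of the greedy loop's break point
--     q = p - n + 1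
--     if q < 0 or n < 2:
--         return []
--     if n * (n - 1) // 2 < q:
--         return []
--     # smallest x in [2, n] with x*(x-1)//2 >= q, by binary search
--     lo, hi = 2, n
--     while lo < hi:
--         mid = (lo + hi) // 2
--         if mid * (mid - 1) // 2 >= q:
--             hi = mid
--         else:
--             lo = mid + 1
--     x = lo
--     return list(range(2, x)) + [q + x - x * (x - 1) // 2] + [1] * (n - x)
-- ===== Notes on version B (the rewrite author's own statement) =====
-- stated objective: alternative
-- what changed: Replaces the linear greedy loop (append 2,3,4,... until the budget is reached) by a binary search for the smallest x with x*(x-1)//2 >= p-n+1, then builds the result directly as range(2,x) + [remainder] + [1]*(n-x); output construction still dominates, so no measured speedup.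
import Mathlib
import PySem

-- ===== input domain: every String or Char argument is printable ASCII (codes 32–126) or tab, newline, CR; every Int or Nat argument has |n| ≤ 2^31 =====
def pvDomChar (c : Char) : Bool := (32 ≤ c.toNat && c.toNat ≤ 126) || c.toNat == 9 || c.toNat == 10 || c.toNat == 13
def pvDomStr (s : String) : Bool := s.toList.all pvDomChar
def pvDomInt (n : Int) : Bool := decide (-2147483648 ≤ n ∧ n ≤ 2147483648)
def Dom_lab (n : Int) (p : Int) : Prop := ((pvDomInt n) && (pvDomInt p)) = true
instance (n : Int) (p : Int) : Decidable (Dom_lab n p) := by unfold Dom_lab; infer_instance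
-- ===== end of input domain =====

-- B replaces A's linear greedy loop by a binary search for the break point plus direct
-- construction of the output list; equality of return values is proved for all inputs.

-- ===== PORT A =====
-- A's for-loop with its break; state = (accumulated list l, total t, counter x);
-- first result component is t (set to p on break), second is l
def labLoopA (p : Int) : List Int → List Int → Int → Int → Int × List Int
  | [], l, t, _ => (t, l)
  | i :: rest, l, t, x =>
    let x' := x + 1
    if t + x' + i - 1 ≥ p then
      (p, (PySem.List.pyRange 0 (i - 1) 1).foldl (fun acc _ => acc ++ [(1 : Int)])
            (l ++ [p - t - i + 1]))
    else
      labLoopA p rest (l ++ [x']) (t + x') x'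

def lab (n : Int) (p : Int) : List Int :=
  if p < n - 1 then []
  else
    let res := labLoopA p (PySem.List.pyRange (n - 1) 0 (-1)) [] 0 1
    if res.1 < p then [] else res.2

-- ===== PORT B =====
-- Source B's while-loop: bisect for the smallest x with x*(x-1)//2 >= q
def labBs (q : Int) (lo hi : Int) : Int :=
  if h : lo < hi then
    let mid := PySem.Int.floordiv (lo + hi) 2
    if PySem.Int.floordiv (mid * (mid - 1)) 2 ≥ q then labBs q lo mid
    else labBs q (mid + 1) hi
  else lo
termination_by (hi - lo).toNat
decreasing_by
  · have hm : PySem.Int.floordiv (lo + hi) 2 = (lo + hi) / 2 :=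
      PySem.Int.floordiv_eq_ediv_of_pos (by omega)
    omega
  · have hm : PySem.Int.floordiv (lo + hi) 2 = (lo + hi) / 2 :=
      PySem.Int.floordiv_eq_ediv_of_pos (by omega)
    omega

def lab_alt (n : Int) (p : Int) : List Int :=
  let q := p - n + 1
  if q < 0 ∨ n < 2 then []
  else if PySem.Int.floordiv (n * (n - 1)) 2 < q then []
  else
    let x := labBs q 2 n
    PySem.List.pyRange 2 x 1 ++ [q + x - PySem.Int.floordiv (x * (x - 1)) 2]
      ++ PySem.List.pyRepeat [1] (n - x)

-- ===== PRECONDITION & SPEC =====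
def Spec_lab (n : Int) (p : Int) (out : List Int) : Prop := out = lab_alt n p
instance (n : Int) (p : Int) (out : List Int) : Decidable (Spec_lab n p out) := by unfold Spec_lab; infer_instance

-- ===== CLAIM (what is proved, stated in full; the proofs are below) =====
def Claim_equal_lab : Prop := ∀ (n : Int) (p : Int), Dom_lab n p → Spec_lab n p (lab n p)

-- ===== LEMMAS AND PROOFS =====

-- T x = x*(x-1)//2, the triangular quantity both programs compare against q = p-n+1
def T (x : Int) : Int := PySem.Int.floordiv (x * (x - 1)) 2

lemma T_char (x : Int) : 2 * T x = x * (x - 1) := by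
  have he : Even (x * (x - 1)) := by
    have := Int.even_mul_succ_self (x - 1); convert this using 1; ring
  obtain ⟨k, hk⟩ := he
  unfold T
  rw [PySem.Int.floordiv_eq_ediv_of_pos (by omega : (0:Int) < 2)]
  omega

lemma T_mono {a b : Int} (ha : 1 ≤ a) (hab : a ≤ b) : T a ≤ T b := by
  have h1 := T_char a; have h2 := T_char b; nlinarith

lemma T_succ (x : Int) : T (x + 1) = T x + x := by
  have h1 := T_char x; have h2 := T_char (x + 1); nlinarith

-- linear-scan specification of the break point: first y in [lo,hi] with T y ≥ q
def firstGE (q : Int) (lo hi : Int) : Option Int :=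
  if h : lo ≤ hi then
    if T lo ≥ q then some lo else firstGE q (lo + 1) hi
  else none
termination_by (hi + 1 - lo).toNat
decreasing_by omega

lemma firstGE_some {q lo hi : Int} : ∀ {m : Int}, firstGE q lo hi = some m →
    lo ≤ m ∧ m ≤ hi ∧ q ≤ T m ∧ ∀ y, lo ≤ y → y < m → T y < q := by
  induction lo using firstGE.induct (q := q) (hi := hi) with
  | case1 lo hle hT =>
    intro m h
    rw [firstGE, dif_pos hle, if_pos hT] at h
    obtain rfl : lo = m := by exact_mod_cast Option.some_injective _ h
    exact ⟨le_refl _, hle, hT, fun y h1 h2 => absurd (lt_of_le_of_lt h1 h2) (lt_irrefl _)⟩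
  | case2 lo hle hT ih =>
    intro m h
    rw [firstGE, dif_pos hle, if_neg hT] at h
    obtain ⟨h1, h2, h3, h4⟩ := ih h
    refine ⟨by omega, h2, h3, fun y hy1 hy2 => ?_⟩
    rcases eq_or_lt_of_le hy1 with rfl | hlt
    · omega
    · exact h4 y (by omega) hy2
  | case3 lo hgt =>
    intro m h
    rw [firstGE, dif_neg hgt] at h
    exact absurd h (by simp)

lemma firstGE_none {q lo hi : Int} : firstGE q lo hi = none →
    ∀ y, lo ≤ y → y ≤ hi → T y < q := by
  induction lo using firstGE.induct (q := q) (hi := hi) with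
  | case1 lo hle hT =>
    intro h; rw [firstGE, dif_pos hle, if_pos hT] at h; exact absurd h (by simp)
  | case2 lo hle hT ih =>
    intro h y hy1 hy2
    rw [firstGE, dif_pos hle, if_neg hT] at h
    rcases eq_or_lt_of_le hy1 with rfl | hlt
    · omega
    · exact ih h y (by omega) hy2
  | case3 lo hgt =>
    intro _ y hy1 hy2; omega

-- binary search returns the least x in [lo,hi] with q ≤ T x (given one exists at hi)
lemma labBs_spec (q : Int) : ∀ (k : Nat) (lo hi : Int), (hi - lo).toNat = k →
    1 ≤ lo → lo ≤ hi → q ≤ T hi →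
    lo ≤ labBs q lo hi ∧ labBs q lo hi ≤ hi ∧ q ≤ T (labBs q lo hi) ∧
      ∀ y, lo ≤ y → y < labBs q lo hi → T y < q := by
  intro k
  induction k using Nat.strong_induction_on with
  | _ k ih =>
    intro lo hi hk hlo1 hle hhi
    rcases eq_or_lt_of_le hle with rfl | hlt
    · rw [labBs, dif_neg (by omega)]
      exact ⟨le_refl _, le_refl _, hhi, fun y h1 h2 => by omega⟩
    · rw [labBs, dif_pos hlt]
      have hme : PySem.Int.floordiv (lo + hi) 2 = (lo + hi) / 2 :=
        PySem.Int.floordiv_eq_ediv_of_pos (by omega)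
      set mid := PySem.Int.floordiv (lo + hi) 2 with hmid
      have hbnd : lo ≤ mid ∧ mid < hi := by omega
      by_cases hT : PySem.Int.floordiv (mid * (mid - 1)) 2 ≥ q
      · rw [if_pos hT]
        have := ih (mid - lo).toNat (by omega) lo mid rfl hlo1 (by omega) hT
        exact ⟨this.1, by omega, this.2.2.1, this.2.2.2⟩
      · rw [if_neg hT]
        have hTm : T mid < q := by unfold T; omega
        have hr := ih (hi - (mid + 1)).toNat (by omega) (mid + 1) hi rfl (by omega) (by omega) hhi
        refine ⟨by omega, hr.2.1, hr.2.2.1, fun y h1 h2 => ?_⟩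
        by_cases hy : y ≤ mid
        · have hmono : T y ≤ T mid := T_mono (by omega) hy
          omega
        · exact hr.2.2.2 y (by omega) h2

-- A's inner append-1 loop equals List.replicate
lemma foldl_append_one (xs : List Int) : ∀ l : List Int,
    xs.foldl (fun acc _ => acc ++ [(1 : Int)]) l = l ++ List.replicate xs.length 1 := by
  induction xs with
  | nil => intro l; simp
  | cons a t ih =>
    intro l
    simp only [List.foldl, ih, List.length_cons]
    simp [List.replicate_succ]

-- main loop invariant: at entry with remaining range(i,0,-1), x = n-i, t = T(n-i+1)-1
lemma loopA_spec (n p : Int) : ∀ (k : Nat) (i : Int), i = (k : Int) → ∀ l : List Int,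
    labLoopA p (PySem.List.pyRange i 0 (-1)) l (T (n - i + 1) - 1) (n - i) =
      match firstGE (p - n + 1) (n - i + 1) n with
      | some m => (p, l ++ PySem.List.pyRange (n - i + 1) m 1
                        ++ [(p - n + 1) + m - T m] ++ List.replicate (n - m).toNat 1)
      | none => (T (n + 1) - 1, l ++ PySem.List.pyRange (n - i + 1) (n + 1) 1) := by
  intro k
  induction k with
  | zero =>
    intro i hi l
    subst hi
    rw [PySem.List.pyRange_neg_one_eq_nil (by omega)]
    rw [firstGE, dif_neg (by push_cast; omega)]
    rw [PySem.List.pyRange_one_eq_nil (by push_cast; omega)]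
    simp [labLoopA]
  | succ k ih =>
    intro i hi l
    have hi1 : 1 ≤ i := by omega
    rw [PySem.List.pyRange_neg_one_cons (by omega)]
    rw [labLoopA]
    rw [firstGE, dif_pos (by omega : n - i + 1 ≤ n)]
    by_cases hc : p - n + 1 ≤ T (n - i + 1)
    · rw [if_pos (by have := T_char (n - i + 1); omega), if_pos hc]
      simp only [foldl_append_one, PySem.List.length_pyRange_one]
      rw [PySem.List.pyRange_one_eq_nil (le_refl (n - i + 1))]
      have e1 : p - (T (n - i + 1) - 1) - i + 1 = (p - n + 1) + (n - i + 1) - T (n - i + 1) := by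
        ring
      have e2 : (i - 1 - 0).toNat = (n - (n - i + 1)).toNat := by congr 1; ring
      rw [e1, e2]
      simp
    · rw [if_neg (by have := T_char (n - i + 1); omega), if_neg hc]
      have hrec := ih (i - 1) (by omega) (l ++ [n - i + 1])
      have est : T (n - (i - 1) + 1) - 1 = T (n - i + 1) - 1 + (n - i + 1) := by
        have h1 := T_succ (n - i + 1)
        have e : n - (i - 1) + 1 = n - i + 1 + 1 := by ring
        rw [e]; omega
      rw [est, (by ring : n - (i - 1) = n - i + 1)] at hrec
      rw [hrec]
      cases hfg : firstGE (p - n + 1) (n - i + 1 + 1) n with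
      | some m =>
        have hm := firstGE_some hfg
        simp only []
        rw [PySem.List.pyRange_one_cons (a := n - i + 1) (by omega)]
        simp
      | none =>
        simp only []
        rw [PySem.List.pyRange_one_cons (a := n - i + 1) (by omega)]
        simp

theorem lab_eq_alt (n p : Int) : lab n p = lab_alt n p := by
  unfold lab lab_alt
  by_cases h1 : p < n - 1
  · rw [if_pos h1, if_pos (Or.inl (by omega))]
  · rw [if_neg h1]
    by_cases h2 : n < 2
    · rw [if_pos (Or.inr h2)]
      rw [PySem.List.pyRange_neg_one_eq_nil (by omega)]
      simp only [labLoopA]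
      split <;> rfl
    · rw [if_neg (by omega : ¬ (p - n + 1 < 0 ∨ n < 2))]
      have hfd : PySem.Int.floordiv (n * (n - 1)) 2 = T n := rfl
      have key := loopA_spec n p (n - 1).toNat (n - 1) (by omega) []
      rw [(by omega : n - (n - 1) + 1 = 2), (by omega : n - (n - 1) = 1)] at key
      have hT2 : T 2 = 1 := by decide
      rw [hT2] at key
      norm_num at key
      cases hfg : firstGE (p - n + 1) 2 n with
      | some m =>
        rw [hfg] at key
        have hm := firstGE_some hfg
        have hTn : p - n + 1 ≤ T n := le_trans hm.2.2.1 (T_mono (by omega) hm.2.1)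
        have hbs := labBs_spec (p - n + 1) (n - 2).toNat 2 n rfl (by omega) (by omega) hTn
        have hxm : labBs (p - n + 1) 2 n = m := by
          rcases lt_trichotomy (labBs (p - n + 1) 2 n) m with h | h | h
          · have := hm.2.2.2 _ hbs.1 h; omega
          · exact h
          · have := hbs.2.2.2 _ hm.1 h; omega
        rw [key]
        rw [if_neg (show ¬ PySem.Int.floordiv (n * (n - 1)) 2 < p - n + 1 from by
          rw [hfd]; omega)]
        simp [hxm, PySem.List.pyRepeat_singleton]
        unfold T
        exact PySem.Int.floordiv_eq_ediv_of_pos (by omega : (0:Int) < 2)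
      | none =>
        rw [hfg] at key
        have hTn : T n < p - n + 1 := firstGE_none hfg n (by omega) (le_refl n)
        rw [key]
        rw [if_pos (show PySem.Int.floordiv (n * (n - 1)) 2 < p - n + 1 from by
          rw [hfd]; omega)]
        have hsucc := T_succ n
        simp [show T (n + 1) - 1 < p from by omega]

-- ===== VERDICT (by name: the statement is the Claim_ definition above) =====
theorem lab_spec : Claim_equal_lab := by
  intro n p _
  unfold Spec_lab
  exact lab_eq_alt n p
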